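-- pv_equiv track=rewrite | github.com/elijah-nelson/oshc_roster_uploader | read_amy_roster.py | line_segment_indices
-- ===== SOURCE A (Python) =====
-- def line_segment_indices(line: str) -> list[tuple[int, str]]:
--     output = []
--     starting_i = 0
--     current_segment = ""
--     for i, c in enumerate(line):
--         if c == " ":
--             if current_segment:
--                 output.append((starting_i, current_segment))
--                 current_segment = ""
--             continue
--
--         if current_segment:
--             current_segment += c
--         else:
--             starting_i = i
--             current_segment = c
--
--     if current_segment:
--         output.append((starting_i, current_segment))
--         current_segment = ""
--
--     return output
-- ===== SOURCE B (Python) =====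
-- import re
--
-- def line_segment_indices(line: str) -> list[tuple[int, str]]:
--     return [(m.start(), m.group()) for m in re.finditer(r'[^ ]+', line)]
-- ===== Notes on version B (the rewrite author's own statement) =====
-- stated objective: faster
-- what changed: Replaced the hand-written per-character state machine (current_segment/starting_i accumulators plus final flush) with a single regex scan re.finditer(r'[^ ]+', line); constant-factor speedup because the scan runs in the C regex engine instead of a Python-level loop.
import Mathlib
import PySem

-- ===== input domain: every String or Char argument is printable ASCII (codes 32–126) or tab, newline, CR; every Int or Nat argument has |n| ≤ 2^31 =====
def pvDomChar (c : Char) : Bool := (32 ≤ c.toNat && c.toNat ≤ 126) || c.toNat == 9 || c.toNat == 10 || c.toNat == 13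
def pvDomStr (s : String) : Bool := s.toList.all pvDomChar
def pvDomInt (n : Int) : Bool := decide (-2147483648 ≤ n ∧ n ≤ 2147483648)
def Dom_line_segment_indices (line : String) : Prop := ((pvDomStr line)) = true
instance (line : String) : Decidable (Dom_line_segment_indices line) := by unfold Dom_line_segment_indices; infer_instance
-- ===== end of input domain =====

-- B replaces A's per-character state machine with a single regex scan (re.finditer of [^ ]+) over maximal non-space runs; measurably faster since the scan runs in the C regex engine.

-- ===== PORT A =====
-- the for-loop over enumerate(line) with state (output, starting_i, current_segment)
def pvLoopA (l : List Char) (n : Int) (out : List (Int × String)) (si : Int)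
    (cur : List Char) : List (Int × String) × Int × List Char :=
  match l with
  | [] => (out, si, cur)
  | c :: rest =>
    if c = ' ' then
      if cur ≠ [] then pvLoopA rest (n + 1) (out ++ [(si, String.mk cur)]) si []
      else pvLoopA rest (n + 1) out si cur
    else
      if cur ≠ [] then pvLoopA rest (n + 1) out si (cur ++ [c])
      else pvLoopA rest (n + 1) out n [c]

-- the final 'if current_segment: output.append(...)'
def pvFlushA (out : List (Int × String)) (si : Int) (cur : List Char) : List (Int × String) :=
  if cur ≠ [] then out ++ [(si, String.mk cur)] else out

def line_segment_indices (line : String) : List (Int × String) :=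
  let r := pvLoopA line.toList 0 [] 0 []
  pvFlushA r.1 r.2.1 r.2.2

-- ===== PORT B =====
-- port of re.finditer(r'[^ ]+', line): successive maximal runs of non-space chars with their start offsets
def pvScanB (i : Int) (l : List Char) : List (Int × String) :=
  match l with
  | [] => []
  | c :: cs =>
    if c = ' ' then pvScanB (i + 1) cs
    else
      let t := cs.takeWhile (· ≠ ' ')
      (i, String.mk (c :: t)) :: pvScanB (i + 1 + t.length) (cs.dropWhile (· ≠ ' '))
termination_by l.length
decreasing_by
  · simp
  · have := List.length_dropWhile_le (fun c => decide (c ≠ ' ')) cs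
    simp at this ⊢; omega

def line_segment_indices_alt (line : String) : List (Int × String) :=
  pvScanB 0 line.toList

-- ===== PRECONDITION & SPEC =====
def Spec_line_segment_indices (line : String) (out : List (Int × String)) : Prop := out = line_segment_indices_alt line
instance (line : String) (out : List (Int × String)) : Decidable (Spec_line_segment_indices line out) := by unfold Spec_line_segment_indices; infer_instance

-- ===== CLAIM (what is proved, stated in full; the proofs are below) =====
def Claim_equal_line_segment_indices : Prop := ∀ (line : String), Dom_line_segment_indices line → Spec_line_segment_indices line (line_segment_indices line)

-- ===== LEMMAS AND PROOFS =====

-- joint invariant for A's loop: between segments (cur = []) and mid-segment (cur ≠ [])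
theorem pvLoopA_inv (l : List Char) :
    (∀ (n : Int) (out : List (Int × String)) (si : Int),
      pvFlushA (pvLoopA l n out si []).1 (pvLoopA l n out si []).2.1 (pvLoopA l n out si []).2.2
        = out ++ pvScanB n l) ∧
    (∀ (n : Int) (out : List (Int × String)) (si : Int) (cur : List Char), cur ≠ [] →
      pvFlushA (pvLoopA l n out si cur).1 (pvLoopA l n out si cur).2.1 (pvLoopA l n out si cur).2.2
        = out ++ (si, String.mk (cur ++ l.takeWhile (· ≠ ' ')))
            :: pvScanB (n + (l.takeWhile (· ≠ ' ')).length) (l.dropWhile (· ≠ ' '))) := by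
  induction l with
  | nil =>
    constructor
    · intro n out si
      simp [pvLoopA, pvFlushA, pvScanB]
    · intro n out si cur hcur
      simp [pvLoopA, pvFlushA, pvScanB, hcur]
  | cons c rest ih =>
    obtain ⟨ih1, ih2⟩ := ih
    constructor
    · intro n out si
      by_cases hc : c = ' '
      · rw [show pvLoopA (c :: rest) n out si [] = pvLoopA rest (n + 1) out si [] from by
          simp [pvLoopA, hc]]
        rw [ih1 (n + 1) out si]
        simp [pvScanB, hc]
      · rw [show pvLoopA (c :: rest) n out si [] = pvLoopA rest (n + 1) out n [c] from by
          simp [pvLoopA, hc]]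
        rw [ih2 (n + 1) out n [c] (by simp)]
        simp only [pvScanB, if_neg hc, List.cons_append, List.nil_append]
    · intro n out si cur hcur
      by_cases hc : c = ' '
      · rw [show pvLoopA (c :: rest) n out si cur
              = pvLoopA rest (n + 1) (out ++ [(si, String.mk cur)]) si [] from by
          simp [pvLoopA, hc, hcur]]
        rw [ih1 (n + 1) (out ++ [(si, String.mk cur)]) si]
        simp [pvScanB, List.takeWhile, List.dropWhile, hc]
      · rw [show pvLoopA (c :: rest) n out si cur
              = pvLoopA rest (n + 1) out si (cur ++ [c]) from by
          simp [pvLoopA, hc, hcur]]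
        rw [ih2 (n + 1) out si (cur ++ [c]) (by simp)]
        rw [show n + 1 + ((rest.takeWhile (· ≠ ' ')).length : Int)
              = n + (((c :: rest).takeWhile (· ≠ ' ')).length : Int) from by
          simp [List.takeWhile, hc]; ring]
        simp [List.takeWhile, List.dropWhile, hc]

-- ===== VERDICT (by name: the statement is the Claim_ definition above) =====
theorem line_segment_indices_spec : Claim_equal_line_segment_indices := by
  intro line _
  unfold Spec_line_segment_indices line_segment_indices line_segment_indices_alt
  exact (pvLoopA_inv line.toList).1 0 [] 0
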